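-- pv_equiv track=rewrite | github.com/tobinus/OTD-semantic-framework | similarity/csv_parse.py | get_fragment
-- ===== SOURCE A (Python) =====
-- def get_fragment(uri):
--     """
--     Get the final part of the URI.
--
--     The final part is the text after the last hash (#) or slash (/), and is
--     typically the part that varies and is appended to the namespace.
--
--     Args:
--         uri: The full URI to extract the fragment from.
--
--     Returns:
--         The final part of the given URI.
--     """
--     fragment_delimiters = ('#', '/')
--     alternatives = tuple(
--         uri.rsplit(delimiter, maxsplit=1)[-1]
--         for delimiter in fragment_delimiters
--         if delimiter in uri
--     )
--     # Return whatever alternative is shortest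
--     return min(alternatives, key=len)
-- ===== SOURCE B (Python) =====
-- def get_fragment(uri):
--     """Single backward scan: collect trailing characters until the first
--     '#' or '/' seen from the right, instead of building both rsplit
--     candidates and taking the shorter one."""
--     chars = []
--     for ch in reversed(uri):
--         if ch == '#' or ch == '/':
--             chars.reverse()
--             return ''.join(chars)
--         chars.append(ch)
--     raise ValueError("URI contains no '#' or '/'")
-- ===== Notes on version B (the rewrite author's own statement) =====
-- stated objective: alternative
-- what changed: Replaces A's two rsplit passes plus min-by-length over the candidate suffixes with a single backward scan that collects characters until the first delimiter seen from the right; Pre_ excludes strings with neither '#' nor '/', on which both A and B raise ValueError.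
import Mathlib
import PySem

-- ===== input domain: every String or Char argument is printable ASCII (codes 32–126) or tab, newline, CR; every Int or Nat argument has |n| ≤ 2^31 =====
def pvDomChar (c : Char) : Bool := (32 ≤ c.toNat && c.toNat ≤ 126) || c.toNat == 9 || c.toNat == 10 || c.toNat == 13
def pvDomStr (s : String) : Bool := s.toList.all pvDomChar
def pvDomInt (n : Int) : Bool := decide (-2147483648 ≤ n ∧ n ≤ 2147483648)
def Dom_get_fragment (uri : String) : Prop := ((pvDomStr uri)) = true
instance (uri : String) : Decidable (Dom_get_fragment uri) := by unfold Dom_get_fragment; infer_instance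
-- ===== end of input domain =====

-- B is a single backward scan instead of A's two rsplits + min-by-length; return values proved equal whenever '#' or '/' occurs in uri (both raise ValueError otherwise).

-- ===== PORT A =====
-- hand port of `uri.rsplit(d, maxsplit=1)[-1]` for a one-character delimiter d:
-- the text after the LAST occurrence of d, or the whole string if d is absent (exact).
def rsplit1Last (s : List Char) (d : Char) : List Char :=
  if d ∈ s then (s.reverse.takeWhile (· ≠ d)).reverse else s

def get_fragment (uri : String) : String :=
  let alternatives := (['#', '/']).filterMap
    (fun d => if PySem.Str.isIn (String.ofList [d]) uri = true
              then some (rsplit1Last uri.toList d) else none)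
  -- min(alternatives, key=len); min() on an empty sequence raises ValueError (excluded by Pre_)
  match PySem.List.min? alternatives (fun l => l.length) with
  | some m => String.ofList m
  | none => ""

-- ===== PORT B =====
-- B's loop over reversed(uri): break (returning the reversed accumulator) at the
-- first '#' or '/', raise ValueError (none) if the loop finishes.
def altLoop : List Char → List Char → Option (List Char)
  | [], _ => none
  | c :: rest, acc =>
      if c = '#' ∨ c = '/' then some acc.reverse else altLoop rest (acc ++ [c])

def get_fragment_alt (uri : String) : String :=
  match altLoop uri.toList.reverse [] with
  | some l => String.ofList l
  | none => ""   -- unreachable under Pre_ (B raises ValueError there)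

-- ===== PRECONDITION & SPEC =====
-- Pre_ excludes exactly the strings containing neither '#' nor '/': there A's min()
-- raises ValueError (empty sequence) and B raises ValueError as well.
def Pre_get_fragment (uri : String) : Prop :=
  PySem.Str.isIn "#" uri = true ∨ PySem.Str.isIn "/" uri = true
instance (uri : String) : Decidable (Pre_get_fragment uri) := by
  unfold Pre_get_fragment; infer_instance

def pvWitness_get_fragment : String := "http://x/y#z"

def Spec_get_fragment (uri : String) (out : String) : Prop := out = get_fragment_alt uri
instance (uri : String) (out : String) : Decidable (Spec_get_fragment uri out) := by unfold Spec_get_fragment; infer_instance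

-- ===== CLAIM (what is proved, stated in full; the proofs are below) =====
def Claim_equal_get_fragment : Prop := ∀ (uri : String), Dom_get_fragment uri → Pre_get_fragment uri → Spec_get_fragment uri (get_fragment uri)

-- ===== LEMMAS AND PROOFS =====

theorem singleton_infix_iff_mem {α : Type} (a : α) (l : List α) :
    [a] <:+: l ↔ a ∈ l := by
  constructor
  · intro h; exact h.subset (List.mem_singleton_self a)
  · intro h
    obtain ⟨s, t, rfl⟩ := List.append_of_mem h
    exact ⟨s, t, by simp⟩

theorem isIn_single_iff (c : Char) (uri : String) :
    PySem.Str.isIn (String.ofList [c]) uri = true ↔ c ∈ uri.toList := by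
  rw [PySem.Str.isIn_iff_infix]
  have h : (String.ofList [c]).toList = [c] := by simp
  rw [h]
  exact singleton_infix_iff_mem c uri.toList

theorem length_takeWhile_le {α : Type} (p : α → Bool) (l : List α) :
    (l.takeWhile p).length ≤ l.length :=
  (List.takeWhile_prefix p).length_le

-- B's loop computes the takeWhile of the combined predicate.
theorem altLoop_eq (r acc : List Char) :
    altLoop r acc =
      if '#' ∈ r ∨ '/' ∈ r
      then some ((acc ++ r.takeWhile (fun c => c ≠ '#' ∧ c ≠ '/')).reverse)
      else none := by
  induction r generalizing acc with
  | nil => simp [altLoop]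
  | cons c rest ih =>
      by_cases hc : c = '#' ∨ c = '/'
      · rcases hc with h | h <;> subst h <;> simp [altLoop]
      · have h1 : c ≠ '#' := fun h => hc (Or.inl h)
        have h2 : c ≠ '/' := fun h => hc (Or.inr h)
        rw [show altLoop (c :: rest) acc = altLoop rest (acc ++ [c]) by
          simp [altLoop, hc]]
        rw [ih]
        rw [List.takeWhile_cons, show (decide (c ≠ '#' ∧ c ≠ '/')) = true by simp [h1, h2]]
        by_cases hm : '#' ∈ rest ∨ '/' ∈ rest
        · rw [if_pos hm, if_pos (by simp [List.mem_cons]; tauto)]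
          simp
        · rw [if_neg hm, if_neg (by simp [List.mem_cons, h1.symm, h2.symm]; tauto)]

-- the combined takeWhile is the shorter of the two single-delimiter takeWhiles
theorem takeWhile_and (r : List Char) :
    r.takeWhile (fun c => decide (c ≠ '#' ∧ c ≠ '/')) =
      (if (r.takeWhile (fun c => decide (c ≠ '#'))).length ≤
            (r.takeWhile (fun c => decide (c ≠ '/'))).length
       then r.takeWhile (fun c => decide (c ≠ '#'))
       else r.takeWhile (fun c => decide (c ≠ '/'))) := by
  induction r with
  | nil => simp
  | cons c rest ih =>
      by_cases h1 : c = '#'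
      · subst h1; simp
      · by_cases h2 : c = '/'
        · subst h2
          rw [List.takeWhile_cons, List.takeWhile_cons, List.takeWhile_cons]
          rw [show (decide (('/':Char) ≠ '#' ∧ ('/':Char) ≠ '/')) = false by simp,
              show (decide (('/':Char) ≠ '#')) = true by simp [h1],
              show (decide (('/':Char) ≠ '/')) = false by simp]
          simp
        · rw [List.takeWhile_cons, List.takeWhile_cons, List.takeWhile_cons]
          rw [show (decide (c ≠ '#' ∧ c ≠ '/')) = true by simp [h1, h2],
              show (decide (c ≠ '#')) = true by simp [h1],
              show (decide (c ≠ '/')) = true by simp [h2]]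
          simp only [if_true, List.length_cons]
          rw [ih]
          by_cases hle : (rest.takeWhile (fun c => decide (c ≠ '#'))).length ≤
              (rest.takeWhile (fun c => decide (c ≠ '/'))).length
          · rw [if_pos hle, if_pos (by omega)]
          · rw [if_neg hle, if_neg (by omega)]

-- when d is absent, the single-delimiter takeWhile is the whole list
theorem takeWhile_of_not_mem (r : List Char) (d : Char) (h : d ∉ r) :
    r.takeWhile (fun c => decide (c ≠ d)) = r := by
  apply List.takeWhile_eq_self_iff.mpr
  intro c hc
  simp only [decide_eq_true_eq]
  rintro rfl; exact h hc

theorem rsplit1Last_of_mem (s : List Char) (d : Char) (h : d ∈ s) :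
    rsplit1Last s d = (s.reverse.takeWhile (fun c => decide (c ≠ d))).reverse := by
  simp [rsplit1Last, h]

theorem min?_pair (a b : List Char) :
    PySem.List.min? [a, b] (fun l => l.length) =
      some (if b.length < a.length then b else a) := by
  simp only [PySem.List.min?, List.foldl_cons, List.foldl_nil]
  split_ifs <;> rfl

theorem min?_single (a : List Char) :
    PySem.List.min? [a] (fun l => l.length) = some a := rfl

-- ===== VERDICT (by name: the statement is the Claim_ definition above) =====
theorem get_fragment_spec : Claim_equal_get_fragment := by
  intro uri _ hpre
  unfold Spec_get_fragment get_fragment get_fragment_alt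
  have hpre' : '#' ∈ uri.toList ∨ '/' ∈ uri.toList := by
    rcases hpre with h | h
    · exact Or.inl ((isIn_single_iff '#' uri).mp h)
    · exact Or.inr ((isIn_single_iff '/' uri).mp h)
  have hprerev : '#' ∈ uri.toList.reverse ∨ '/' ∈ uri.toList.reverse := by
    simpa using hpre'
  rw [altLoop_eq, if_pos hprerev]
  simp only [List.nil_append]
  by_cases hH : '#' ∈ uri.toList
  · by_cases hS : '/' ∈ uri.toList
    · -- both delimiters present: two alternatives, min-by-length
      have e1 : PySem.Chars.isIn ['#'] uri.toList = true := by
        simpa using (isIn_single_iff '#' uri).mpr hH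
      have e2 : PySem.Chars.isIn ['/'] uri.toList = true := by
        simpa using (isIn_single_iff '/' uri).mpr hS
      have halt : (['#', '/']).filterMap
          (fun d => if PySem.Str.isIn (String.ofList [d]) uri = true
                    then some (rsplit1Last uri.toList d) else none) =
          [rsplit1Last uri.toList '#', rsplit1Last uri.toList '/'] := by
        simp [e1, e2]
      rw [halt, rsplit1Last_of_mem _ _ hH, rsplit1Last_of_mem _ _ hS, min?_pair,
          takeWhile_and]
      simp only [List.length_reverse]
      by_cases hle : (uri.toList.reverse.takeWhile (fun c => decide (c ≠ '#'))).length ≤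
          (uri.toList.reverse.takeWhile (fun c => decide (c ≠ '/'))).length
      · rw [if_neg (by omega), if_pos hle]
      · rw [if_pos (by omega), if_neg hle]
    · -- only '#'
      have e1 : PySem.Chars.isIn ['#'] uri.toList = true := by
        simpa using (isIn_single_iff '#' uri).mpr hH
      have e2 : PySem.Chars.isIn ['/'] uri.toList = false := by
        rw [Bool.eq_false_iff]
        intro h
        exact hS ((isIn_single_iff '/' uri).mp (by simpa using h))
      have halt : (['#', '/']).filterMap
          (fun d => if PySem.Str.isIn (String.ofList [d]) uri = true
                    then some (rsplit1Last uri.toList d) else none) =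
          [rsplit1Last uri.toList '#'] := by
        simp [e1, e2]
      rw [halt, rsplit1Last_of_mem _ _ hH, min?_single, takeWhile_and]
      have hSr : '/' ∉ uri.toList.reverse := by simpa using hS
      rw [takeWhile_of_not_mem _ '/' hSr,
          if_pos (length_takeWhile_le _ _)]
  · -- only '/'
    have hS : '/' ∈ uri.toList := by tauto
    have e1 : PySem.Chars.isIn ['#'] uri.toList = false := by
      rw [Bool.eq_false_iff]
      intro h
      exact hH ((isIn_single_iff '#' uri).mp (by simpa using h))
    have e2 : PySem.Chars.isIn ['/'] uri.toList = true := by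
      simpa using (isIn_single_iff '/' uri).mpr hS
    have halt : (['#', '/']).filterMap
        (fun d => if PySem.Str.isIn (String.ofList [d]) uri = true
                  then some (rsplit1Last uri.toList d) else none) =
        [rsplit1Last uri.toList '/'] := by
      simp [e1, e2]
    rw [halt, rsplit1Last_of_mem _ _ hS, min?_single, takeWhile_and]
    have hHr : '#' ∉ uri.toList.reverse := by simpa using hH
    rw [takeWhile_of_not_mem _ '#' hHr]
    rw [if_neg ?_]
    · intro hle
      have hpref := List.takeWhile_prefix (l := uri.toList.reverse)
        (fun c => decide (c ≠ '/'))
      have heq : uri.toList.reverse.takeWhile (fun c => decide (c ≠ '/')) =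
          uri.toList.reverse :=
        hpref.eq_of_length (Nat.le_antisymm (length_takeWhile_le _ _) hle)
      have hmem : '/' ∈ uri.toList.reverse := by simpa using hS
      have := List.mem_takeWhile_imp (l := uri.toList.reverse)
        (p := fun c => decide (c ≠ '/')) (by rw [heq]; exact hmem)
      simp at this
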